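-- pv_equiv track=rewrite | github.com/kjh03160/Algorithm_Basic | practice/ETC/Stone_Jump_Programmers.py | able
-- ===== SOURCE A (Python) =====
-- def able(value, stones, k):
--     now = 0
--     for i in stones:
--         if i - value < 0:
--             now += 1
--         else:
--             now = 0
--         if now >= k:
--             return False
--     return True
--
-- k = 3
-- ===== SOURCE B (Python) =====
-- def able(value, stones, k):
--     if not stones:
--         return True
--     if k > len(stones):
--         return True
--     marks = ''.join('1' if s - value < 0 else '0' for s in stones)
--     return '1' * k not in marks
-- ===== Notes on version B (the rewrite author's own statement) =====
-- stated objective: idiomatic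
-- what changed: Replaces the incremental counter-with-reset-and-early-return loop by mapping each stone to a '1'/'0' marker string and testing whether the run pattern '1'*k occurs as a substring.
import Mathlib
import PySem

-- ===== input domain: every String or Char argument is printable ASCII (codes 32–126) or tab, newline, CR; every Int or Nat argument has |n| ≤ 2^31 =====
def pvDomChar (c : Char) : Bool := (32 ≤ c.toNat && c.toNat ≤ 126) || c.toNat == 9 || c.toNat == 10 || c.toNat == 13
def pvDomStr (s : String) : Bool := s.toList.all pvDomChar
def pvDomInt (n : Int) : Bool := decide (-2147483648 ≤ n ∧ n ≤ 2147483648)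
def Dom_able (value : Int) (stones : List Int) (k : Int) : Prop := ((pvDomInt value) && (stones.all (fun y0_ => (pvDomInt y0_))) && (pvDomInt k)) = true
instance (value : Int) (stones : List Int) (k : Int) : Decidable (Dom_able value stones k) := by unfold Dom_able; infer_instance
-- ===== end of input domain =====

-- B replaces A's counter-with-reset loop by a marker string plus substring search (idiomatic rewrite, same cost).
-- ===== PORT A =====
def ableLoop (value k : Int) : List Int → Int → Bool
  | [], _ => true
  | i :: rest, now =>
    let now' := if i - value < 0 then now + 1 else 0
    if k ≤ now' then false else ableLoop value k rest now'

def able (value : Int) (stones : List Int) (k : Int) : Bool :=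
  ableLoop value k stones 0

-- ===== PORT B =====
-- marks = ''.join('1' if s - value < 0 else '0' for s in stones)  (string ported as List Char per PySem)
def marksOf (value : Int) (stones : List Int) : List Char :=
  stones.map (fun s => if s - value < 0 then '1' else '0')

def able_alt (value : Int) (stones : List Int) (k : Int) : Bool :=
  if stones.isEmpty then true
  else if (stones.length : Int) < k then true
  else !(PySem.Chars.isIn (PySem.List.pyRepeat ['1'] k) (marksOf value stones))

-- ===== PRECONDITION & SPEC =====
def Spec_able (value : Int) (stones : List Int) (k : Int) (out : Bool) : Prop := out = able_alt value stones k
instance (value : Int) (stones : List Int) (k : Int) (out : Bool) : Decidable (Spec_able value stones k out) := by unfold Spec_able; infer_instance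

-- ===== CLAIM (what is proved, stated in full; the proofs are below) =====
def Claim_equal_able : Prop := ∀ (value : Int) (stones : List Int) (k : Int), Dom_able value stones k → Spec_able value stones k (able value stones k)

-- ===== LEMMAS AND PROOFS =====

-- ===== VERDICT (by name: the statement is the Claim_ definition above) =====
-- replicate b c ++ replicate (a-b) c = replicate a c, so a shorter all-c prefix follows from a longer one
theorem rep_prefix_mono {c : Char} {a b : Nat} {l : List Char} (h : b ≤ a)
    (hp : List.replicate a c <+: l) : List.replicate b c <+: l := by
  refine List.IsPrefix.trans ⟨List.replicate (a - b) c, ?_⟩ hp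
  rw [← List.replicate_add]
  congr 1
  omega

theorem rep_succ_prefix_cons {c x : Char} {n : Nat} {l : List Char} :
    List.replicate (n + 1) c <+: x :: l ↔ x = c ∧ List.replicate n c <+: l := by
  rw [List.replicate_succ, List.cons_prefix_cons]
  tauto

theorem exists_drop_cons {P : List Char} {x : Char} {l : List Char} :
    (∃ j, P <+: (x :: l).drop j) ↔ P <+: x :: l ∨ ∃ j, P <+: l.drop j := by
  constructor
  · rintro ⟨j, hj⟩
    cases j with
    | zero => exact Or.inl hj
    | succ j' => exact Or.inr ⟨j', hj⟩
  · rintro (h | ⟨j, hj⟩)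
    · exact ⟨0, h⟩
    · exact ⟨j + 1, hj⟩

-- the loop with trailing-run counter N fails iff the marks contain a completing run
theorem loop_false_iff (value : Int) (K : Nat) (hK : 1 ≤ K) :
    ∀ (stones : List Int) (N : Nat), N < K →
      (ableLoop value (K : Int) stones (N : Int) = false ↔
        (List.replicate (K - N) '1' <+: marksOf value stones ∨
         ∃ j, List.replicate K '1' <+: (marksOf value stones).drop j)) := by
  intro stones
  induction stones with
  | nil =>
    intro N hN
    simp only [ableLoop, marksOf, List.map_nil]
    constructor
    · intro h; cases h
    · rintro (h | ⟨j, hj⟩)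
      · have hl := h.length_le
        simp at hl
        omega
      · have hl := hj.length_le
        simp at hl
        omega
  | cons x rest ih =>
    intro N hN
    by_cases hbel : x - value < 0
    · -- marker '1'
      have hmarks : marksOf value (x :: rest) = '1' :: marksOf value rest := by
        simp only [marksOf, List.map_cons]
        rw [if_pos hbel]
      by_cases hfin : K = N + 1
      · -- the run completes here: the loop returns False
        have hloop : ableLoop value (K : Int) (x :: rest) (N : Int) = false := by
          simp only [ableLoop, if_pos hbel]
          rw [if_pos (by omega)]
        rw [hloop, hmarks]
        simp only [true_iff]
        left
        have : K - N = 1 := by omega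
        rw [this, List.replicate_one]
        exact ⟨marksOf value rest, rfl⟩
      · -- run continues with counter N+1
        have hN1 : N + 1 < K := by omega
        have hloop : ableLoop value (K : Int) (x :: rest) (N : Int) =
            ableLoop value (K : Int) rest ((N : Int) + 1) := by
          simp only [ableLoop, if_pos hbel]
          rw [if_neg (by omega)]
        have hcast : ((N : Int) + 1) = ((N + 1 : Nat) : Int) := by push_cast; ring
        rw [hloop, hcast, ih (N + 1) hN1, hmarks]
        have hKN : K - N = (K - (N + 1)) + 1 := by omega
        constructor
        · rintro (h | ⟨j, hj⟩)
          · left; rw [hKN]; exact rep_succ_prefix_cons.mpr ⟨rfl, h⟩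
          · right; exact exists_drop_cons.mpr (Or.inr ⟨j, hj⟩)
        · rintro (h | h)
          · rw [hKN] at h
            exact Or.inl (rep_succ_prefix_cons.mp h).2
          · rcases exists_drop_cons.mp h with h0 | ⟨j, hj⟩
            · -- a full run starting at the head: its tail gives the needed shorter run
              have : List.replicate K '1' = List.replicate (K - 1 + 1) '1' := by congr 1; omega
              rw [this] at h0
              have h1 : List.replicate (K - 1) '1' <+: marksOf value rest :=
                (rep_succ_prefix_cons.mp h0).2
              exact Or.inl (rep_prefix_mono (by omega) h1)
            · exact Or.inr ⟨j, hj⟩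
    · -- marker '0': the counter resets
      have hmarks : marksOf value (x :: rest) = '0' :: marksOf value rest := by
        simp only [marksOf, List.map_cons]
        rw [if_neg hbel]
      have hloop : ableLoop value (K : Int) (x :: rest) (N : Int) =
          ableLoop value (K : Int) rest ((0 : Nat) : Int) := by
        simp only [ableLoop, if_neg hbel, Nat.cast_zero]
        rw [if_neg (by omega)]
      rw [hloop, ih 0 (by omega), hmarks]
      have hne : ∀ m, 1 ≤ m → ¬ (List.replicate m '1' <+: '0' :: marksOf value rest) := by
        intro m hm h
        have : m = m - 1 + 1 := by omega
        rw [this] at h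
        exact absurd (rep_succ_prefix_cons.mp h).1 (by decide)
      simp only [Nat.sub_zero]
      constructor
      · rintro (h | ⟨j, hj⟩)
        · right; exact exists_drop_cons.mpr (Or.inr ⟨0, by simpa using h⟩)
        · right; exact exists_drop_cons.mpr (Or.inr ⟨j, hj⟩)
      · rintro (h | h)
        · exact absurd h (hne _ (by omega))
        · rcases exists_drop_cons.mp h with h0 | ⟨j, hj⟩
          · exact absurd h0 (hne _ (by omega))
          · right; exact ⟨j, hj⟩

-- ===== VERDICT (by name: the statement is the Claim_ definition above) =====
theorem able_spec : Claim_equal_able := by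
  intro value stones k _
  unfold Spec_able able able_alt
  cases stones with
  | nil => simp [ableLoop]
  | cons x rest =>
    rw [if_neg (by simp)]
    by_cases hlen : ((x :: rest).length : Int) < k
    · -- fewer than k stones: no run of k can exist, both sides True
      rw [if_pos hlen]
      have hK : 1 ≤ k.toNat := by simp at hlen; omega
      have hk0 : ((k.toNat : Nat) : Int) = k := by omega
      have hiff := loop_false_iff value k.toNat hK (x :: rest) 0 (by omega)
      rw [hk0] at hiff
      simp only [Nat.cast_zero, Nat.sub_zero] at hiff
      cases h : ableLoop value k (x :: rest) 0 with
      | true => rfl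
      | false =>
        exfalso
        have hrun : ∃ j, List.replicate k.toNat '1' <+: (marksOf value (x :: rest)).drop j := by
          rcases hiff.mp h with h1 | h2
          · exact ⟨0, by simpa using h1⟩
          · exact h2
        rcases hrun with ⟨j, hj⟩
        have hl := hj.length_le
        rw [List.length_replicate, List.length_drop] at hl
        have hml : (marksOf value (x :: rest)).length = (x :: rest).length := by
          simp [marksOf]
        rw [hml] at hl
        simp only [List.length_cons] at hl hlen
        omega
    rw [if_neg hlen]
    rw [PySem.List.pyRepeat_singleton]
    by_cases hk : k ≤ 0
    · -- '1'*k is '' for k ≤ 0: '' is in every string, and the loop fails at the first stone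
      have h0 : k.toNat = 0 := by omega
      rw [h0, List.replicate_zero, PySem.Chars.isIn_nil]
      have hA : ableLoop value k (x :: rest) 0 = false := by
        simp only [ableLoop]
        have hle : k ≤ (if x - value < 0 then (0 : Int) + 1 else 0) := by
          split <;> omega
        rw [if_pos hle]
      rw [hA]
      rfl
    · have hK : 1 ≤ k.toNat := by omega
      have hk0 : ((k.toNat : Nat) : Int) = k := by omega
      have hiff := loop_false_iff value k.toNat hK (x :: rest) 0 (by omega)
      rw [hk0] at hiff
      simp only [Nat.cast_zero, Nat.sub_zero] at hiff
      cases h : ableLoop value k (x :: rest) 0 with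
      | false =>
        -- loop returns False: a full run exists, so isIn is true
        have hrun : ∃ j, List.replicate k.toNat '1' <+: (marksOf value (x :: rest)).drop j := by
          rcases hiff.mp h with h1 | h2
          · exact ⟨0, by simpa using h1⟩
          · exact h2
        rw [(PySem.Chars.exists_prefix_drop_iff_isIn _ _).mp hrun]
        rfl
      | true =>
        -- loop returns True: no full run, so isIn is false
        have hnorun : ¬ ∃ j, List.replicate k.toNat '1' <+: (marksOf value (x :: rest)).drop j := by
          intro hr
          rw [hiff.mpr (Or.inr hr)] at h
          cases h
        cases hi : PySem.Chars.isIn (List.replicate k.toNat '1') (marksOf value (x :: rest)) with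
        | false => rfl
        | true => exact absurd ((PySem.Chars.exists_prefix_drop_iff_isIn _ _).mpr hi) hnorun
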